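-- pv_equiv track=rewrite | github.com/JAMES1390825/Testcase-Agent | backend/services/postprocess.py | merge_csv_texts
-- ===== SOURCE A (Python) =====
-- from typing import Iterable, List, Tuple
--
-- def merge_csv_texts(chunks: Iterable[str]) -> str:
-- 	"""Merge multiple CSV texts keeping the first header only.
--
-- 	Assumes each chunk is plain CSV text with first line as header.
-- 	"""
-- 	header: str | None = None
-- 	rows: List[str] = []
--
-- 	for chunk in chunks:
-- 		if not chunk:
-- 			continue
-- 		lines = [ln for ln in chunk.replace("\r\n", "\n").replace("\r", "\n").split("\n") if ln != ""]
-- 		if not lines: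
-- 			continue
-- 		if header is None:
-- 			header = lines[0]
-- 			rows.extend(lines[1:])
-- 		else:
-- 			# Skip header line of subsequent chunks if identical or not
-- 			# We conservatively drop only the first line, assuming it's header.
-- 			rows.extend(lines[1:] if len(lines) > 1 else [])
--
-- 	if header is None:
-- 		return ""
-- 	return "\r\n".join([header] + rows)
-- ===== SOURCE B (Python) =====
-- def merge_csv_texts(chunks):
-- 	"""Merge multiple CSV texts keeping the first header only.
--
-- 	Right-to-left fold: the accumulator is the fully merged line list of the
-- 	chunks processed so far (a suffix of the input).  Prepending an earlier
-- 	chunk demotes the accumulator's current first line from header to a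
-- 	dropped subsequent-chunk header, so we slice it off.
-- 	"""
-- 	merged = []
-- 	for chunk in reversed(list(chunks)):
-- 		if not chunk:
-- 			continue
-- 		lines = [ln for ln in chunk.replace("\r\n", "\n").replace("\r", "\n").split("\n") if ln != ""]
-- 		if lines:
-- 			merged = lines + merged[1:]
-- 	return "\r\n".join(merged)
-- ===== Notes on version B (the rewrite author's own statement) =====
-- stated objective: alternative
-- what changed: Replaces A's forward pass with an Optional header flag and a growing rows list by a right-to-left fold whose accumulator is the complete merged line list: each earlier non-empty chunk is prepended whole while the accumulator's first line (the header of a later chunk) is sliced off.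
import Mathlib
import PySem

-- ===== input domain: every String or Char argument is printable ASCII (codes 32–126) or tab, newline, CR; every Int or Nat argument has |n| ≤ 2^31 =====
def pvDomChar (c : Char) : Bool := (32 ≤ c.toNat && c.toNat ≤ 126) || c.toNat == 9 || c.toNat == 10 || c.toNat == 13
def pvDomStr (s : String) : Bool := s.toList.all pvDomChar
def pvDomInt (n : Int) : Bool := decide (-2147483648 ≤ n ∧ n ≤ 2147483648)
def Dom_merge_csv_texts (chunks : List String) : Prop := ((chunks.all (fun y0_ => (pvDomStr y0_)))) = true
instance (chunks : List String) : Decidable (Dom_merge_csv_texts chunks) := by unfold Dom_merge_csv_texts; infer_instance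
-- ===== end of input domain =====

-- B replaces A's forward pass (Optional-header flag + growing rows) by a right-to-left fold whose
-- accumulator is the complete merged line list, slicing off the superseded header; same cost, return value only.

-- ===== PORT A =====
-- shared normalization: chunk.replace("\r\n","\n").replace("\r","\n").split("\n") filtered of "" —
-- the identical expression appears in both Pythons
def pvLines (chunk : String) : List String :=
  -- split? with the literal separator "\n" (non-empty, so the Option is always some)
  ((PySem.Str.split? (PySem.Str.replace (PySem.Str.replace chunk "\r\n" "\n") "\r" "\n") "\n").getD []).filter
    (fun ln => ln ≠ "")

-- A: single forward stateful pass, state = (header : Option String, rows)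
def mergeStepA (st : Option String × List String) (chunk : String) : Option String × List String :=
  if chunk = "" then st
  else
    match pvLines chunk with
    | [] => st
    | l0 :: rest =>
      match st.1 with
      | none => (some l0, st.2 ++ rest)
      | some _ => (st.1, st.2 ++ rest)

def merge_csv_texts (chunks : List String) : String :=
  let st := chunks.foldl mergeStepA (none, [])
  match st.1 with
  | none => ""
  | some h => PySem.Str.join "\r\n" (h :: st.2)

-- ===== PORT B =====
-- B: for chunk in reversed(chunks): if lines: merged = lines + merged[1:]
-- (merged[1:] is List.drop 1, exact for every list including [])
def mergeStepB (merged : List String) (chunk : String) : List String :=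
  if chunk = "" then merged
  else
    match pvLines chunk with
    | [] => merged
    | l0 :: rest => (l0 :: rest) ++ merged.drop 1

def merge_csv_texts_alt (chunks : List String) : String :=
  PySem.Str.join "\r\n" (chunks.reverse.foldl mergeStepB [])

-- ===== PRECONDITION & SPEC =====
def Spec_merge_csv_texts (chunks : List String) (out : String) : Prop := out = merge_csv_texts_alt chunks
instance (chunks : List String) (out : String) : Decidable (Spec_merge_csv_texts chunks out) := by unfold Spec_merge_csv_texts; infer_instance

-- ===== CLAIM =====
def Claim_equal_merge_csv_texts : Prop := ∀ (chunks : List String), Dom_merge_csv_texts chunks → Spec_merge_csv_texts chunks (merge_csv_texts chunks)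

-- ===== LEMMAS AND PROOFS =====

-- proof-only: the non-empty line lists of the truthy chunks (neither port computes this)
def pvClean (chunk : String) : Option (List String) :=
  if chunk = "" then none
  else
    match pvLines chunk with
    | [] => none
    | lines => some lines

-- a cleaned chunk is never the empty line list
lemma pvClean_ne_nil {c : String} {l : List String} (hc : pvClean c = some l) : l ≠ [] := by
  unfold pvClean at hc
  by_cases h : c = ""
  · simp [h] at hc
  · rw [if_neg h] at hc
    cases hl : pvLines c with
    | nil => rw [hl] at hc; exact absurd hc (by simp)
    | cons l0 rest => rw [hl] at hc; cases hc; simp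

-- once A's header is set, the remaining fold only appends the tails of the cleaned chunks
lemma foldA_some (chunks : List String) (h : String) (acc : List String) :
    chunks.foldl mergeStepA (some h, acc) =
      (some h, acc ++ ((chunks.filterMap pvClean).map (fun lines => lines.tail)).flatten) := by
  induction chunks generalizing acc with
  | nil => simp
  | cons c cs ih =>
    rw [List.foldl_cons, List.filterMap_cons]
    by_cases hc : c = ""
    · simp [mergeStepA, pvClean, hc, ih]
    · cases hl : pvLines c with
      | nil => simp [mergeStepA, pvClean, hc, hl, ih]
      | cons l0 rest =>
        simp [mergeStepA, pvClean, hc, hl, ih, List.append_assoc]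

-- A's fold from the initial state, through the cleaned-chunk list
lemma foldA_none (chunks : List String) :
    chunks.foldl mergeStepA (none, []) =
      match chunks.filterMap pvClean with
      | [] => (none, [])
      | first :: rest =>
          (some (first.headD ""),
           first.tail ++ (rest.map (fun lines => lines.tail)).flatten) := by
  induction chunks with
  | nil => simp
  | cons c cs ih =>
    rw [List.foldl_cons, List.filterMap_cons]
    by_cases hc : c = ""
    · simpa [mergeStepA, pvClean, hc] using ih
    · cases hl : pvLines c with
      | nil => simpa [mergeStepA, pvClean, hc, hl] using ih
      | cons l0 rest => simp [mergeStepA, pvClean, hc, hl, foldA_some]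

-- B's reverse fold, through the same cleaned-chunk list
lemma foldB (chunks : List String) :
    chunks.reverse.foldl mergeStepB [] =
      match chunks.filterMap pvClean with
      | [] => []
      | first :: rest => first ++ (rest.map (fun lines => lines.tail)).flatten := by
  rw [List.foldl_reverse]
  induction chunks with
  | nil => simp
  | cons c cs ih =>
    rw [List.foldr_cons, List.filterMap_cons]
    by_cases hc : c = ""
    · simpa [mergeStepB, pvClean, hc] using ih
    · cases hl : pvLines c with
      | nil => simpa [mergeStepB, pvClean, hc, hl] using ih
      | cons l0 rest =>
        rw [ih]
        cases hp : cs.filterMap pvClean with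
        | nil => simp [mergeStepB, pvClean, hc, hl]
        | cons first restP =>
          have hne : first ≠ [] := by
            have hmem : first ∈ cs.filterMap pvClean := by rw [hp]; exact List.mem_cons_self
            obtain ⟨d, _, hd⟩ := List.mem_filterMap.mp hmem
            exact pvClean_ne_nil hd
          obtain ⟨f0, ft, rfl⟩ := List.exists_cons_of_ne_nil hne
          simp [mergeStepB, pvClean, hc, hl]

-- ===== VERDICT =====
theorem merge_csv_texts_spec : Claim_equal_merge_csv_texts := by
  intro chunks _
  show merge_csv_texts chunks = merge_csv_texts_alt chunks
  simp only [merge_csv_texts, merge_csv_texts_alt]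
  rw [foldA_none, foldB]
  cases hp : chunks.filterMap pvClean with
  | nil => rfl
  | cons first rest =>
    have hne : first ≠ [] := by
      have hmem : first ∈ chunks.filterMap pvClean := by rw [hp]; exact List.mem_cons_self
      obtain ⟨c, _, hc⟩ := List.mem_filterMap.mp hmem
      exact pvClean_ne_nil hc
    obtain ⟨l0, t, rfl⟩ := List.exists_cons_of_ne_nil hne
    simp
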